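-- pv_equiv track=rewrite | github.com/wobertt/math-explorations | substring_parity/main.py | count_odd_slow
-- ===== SOURCE A (Python) =====
-- def count_odd_slow(s: str): # O(n^2)
--     ans = 0
--     n = len(s)
--     for i in range(n):
--         counter = 0
--         for j in range(i, n):
--             counter += s[j] == '1'
--             ans += counter % 2
--     return ans
-- ===== SOURCE B (Python) =====
-- def count_odd_slow(s: str):  # O(n) prefix-parity counting
--     even = 1          # prefixes with an even number of ones (the empty prefix)
--     par = 0           # parity of ones seen so far
--     for ch in s:
--         par ^= ch == '1'
--         even += 1 - par
--     total = len(s) + 1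
--     return even * (total - even)
-- ===== Notes on version B (the rewrite author's own statement) =====
-- stated objective: faster
-- what changed: Replaced A's nested loops over all substring start/end pairs with a single prefix-parity pass: the answer equals (#even-parity prefixes) * (#odd-parity prefixes).
import Mathlib
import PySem

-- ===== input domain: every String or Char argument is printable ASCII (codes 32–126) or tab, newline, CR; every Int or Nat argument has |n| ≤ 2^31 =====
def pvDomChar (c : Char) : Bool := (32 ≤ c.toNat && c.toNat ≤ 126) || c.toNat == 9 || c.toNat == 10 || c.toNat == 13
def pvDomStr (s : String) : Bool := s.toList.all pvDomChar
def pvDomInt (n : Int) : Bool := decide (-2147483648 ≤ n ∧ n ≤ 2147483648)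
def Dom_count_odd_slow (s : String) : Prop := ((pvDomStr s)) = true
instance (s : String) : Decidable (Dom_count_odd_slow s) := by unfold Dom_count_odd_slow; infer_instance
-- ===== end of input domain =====

-- B replaces A's quadratic double loop by one prefix-parity pass:
-- answer = (#even-parity prefixes) * (#odd-parity prefixes); objective: faster (asymptotic).

-- ===== PORT A =====
def count_odd_slow (s : String) : Int :=
  let n := PySem.Str.len s
  (PySem.List.pyRange 0 n 1).foldl
    (fun ans i =>
      ((PySem.List.pyRange i n 1).foldl
        (fun (p : Int × Int) j =>
          let counter := p.1 + (if PySem.List.pyGetD s.toList j ' ' = '1' then 1 else 0)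
          (counter, p.2 + PySem.Int.mod counter 2))
        ((0 : Int), ans)).2)
    0

-- ===== PORT B =====
def count_odd_slow_alt (s : String) : Int :=
  let st := s.toList.foldl
    (fun (p : Int × Int) ch =>
      let par := PySem.Int.bxor p.1 (if ch = '1' then 1 else 0)
      (par, p.2 + (1 - par)))
    ((0 : Int), (1 : Int))
  let total := PySem.Str.len s + 1
  st.2 * (total - st.2)

-- ===== PRECONDITION & SPEC =====
def Spec_count_odd_slow (s : String) (out : Int) : Prop := out = count_odd_slow_alt s
instance (s : String) (out : Int) : Decidable (Spec_count_odd_slow s out) := by unfold Spec_count_odd_slow; infer_instance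

-- ===== CLAIM (what is proved, stated in full; the proofs are below) =====
def Claim_equal_count_odd_slow : Prop := ∀ (s : String), Dom_count_odd_slow s → Spec_count_odd_slow s (count_odd_slow s)

-- ===== LEMMAS AND PROOFS =====

-- (#even-parity prefixes, #odd-parity prefixes) of a list (the empty prefix counts as even)
def pvEO : List Char → Int × Int
  | [] => (1, 0)
  | c :: xs => let p := pvEO xs; if c = '1' then (1 + p.2, p.1) else (1 + p.1, p.2)

-- number of NONEMPTY prefixes whose one-count parity, xor'd with q, is odd
def pvOD : Bool → List Char → Int
  | _, [] => 0
  | q, c :: xs => let q' := if c = '1' then !q else q; (if q' then 1 else 0) + pvOD q' xs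

-- number of NONEMPTY prefixes whose one-count parity, xor'd with q, is even
def pvEV : Bool → List Char → Int
  | _, [] => 0
  | q, c :: xs => let q' := if c = '1' then !q else q; (if q' then 0 else 1) + pvEV q' xs

def pvBI (q : Bool) : Int := if q then 1 else 0

lemma pvBI_true : pvBI true = 1 := rfl
lemma pvBI_false : pvBI false = 0 := rfl

-- the step functions of the two ports, let-free (definitionally equal to the port bodies)
def pvAstep (p : Int × Int) (ch : Char) : Int × Int :=
  (p.1 + (if ch = '1' then 1 else 0),
   p.2 + PySem.Int.mod (p.1 + (if ch = '1' then 1 else 0)) 2)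

def pvBstep (p : Int × Int) (ch : Char) : Int × Int :=
  (PySem.Int.bxor p.1 (if ch = '1' then 1 else 0),
   p.2 + (1 - PySem.Int.bxor p.1 (if ch = '1' then 1 else 0)))

lemma pvRel : ∀ xs : List Char,
    pvEV false xs = (pvEO xs).1 - 1 ∧ pvEV true xs = (pvEO xs).2 ∧
    pvOD false xs = (pvEO xs).2 ∧ pvOD true xs = (pvEO xs).1 - 1 := by
  intro xs
  induction xs with
  | nil => simp [pvEV, pvOD, pvEO]
  | cons c xs ih =>
    obtain ⟨h1, h2, h3, h4⟩ := ih
    by_cases hc : c = '1' <;>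
      simp [pvEV, pvOD, pvEO, hc, h1, h2, h3, h4]

lemma pvEO_sum : ∀ xs : List Char, (pvEO xs).1 + (pvEO xs).2 = (xs.length : Int) + 1 := by
  intro xs
  induction xs with
  | nil => simp [pvEO]
  | cons c xs ih =>
    by_cases hc : c = '1' <;> simp [pvEO, hc] <;> omega

-- the parity of the one-count of xs
def pvPar : List Char → Bool
  | [] => false
  | c :: xs => if c = '1' then !(pvPar xs) else pvPar xs

-- B's single pass computes (final parity, e + #even-relative-to-q nonempty prefixes)
lemma pvB_fold : ∀ (xs : List Char) (q : Bool) (e : Int),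
    xs.foldl pvBstep (pvBI q, e)
      = (pvBI (if pvPar xs then !q else q), e + pvEV q xs) := by
  intro xs
  induction xs with
  | nil => intro q e; simp [pvEV, pvPar]
  | cons c xs ih =>
    intro q e
    rw [List.foldl_cons]
    have hstep : pvBstep (pvBI q, e) c
        = (pvBI (if c = '1' then !q else q),
           e + (if (if c = '1' then !q else q) then 0 else 1)) := by
      by_cases hc : c = '1' <;> cases q <;>
        simp [pvBstep, pvBI, PySem.Int.bxor, hc]
    rw [hstep, ih]
    have hpar : (if pvPar xs then !(if c = '1' then !q else q) else (if c = '1' then !q else q))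
        = (if pvPar (c :: xs) then !q else q) := by
      by_cases hc : c = '1' <;> cases hp : pvPar xs <;> cases q <;> simp [pvPar, hc, hp]
    rw [hpar]
    by_cases hc : c = '1' <;> simp [pvEV, hc] <;> ring

-- A's inner loop adds the number of prefixes that are odd relative to the counter's parity
lemma pvA_inner : ∀ (xs : List Char) (q : Bool) (c a : Int), PySem.Int.mod c 2 = pvBI q →
    (xs.foldl pvAstep (c, a)).2 = a + pvOD q xs := by
  intro xs
  induction xs with
  | nil => intro q c a _; simp [pvOD]
  | cons ch xs ih =>
    intro q c a h
    rw [List.foldl_cons]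
    have hmod : ∀ b : Int, PySem.Int.mod b 2 = b % 2 :=
      fun b => PySem.Int.mod_eq_emod_of_pos (by norm_num)
    rw [hmod] at h
    have h2 : (c + (if ch = '1' then 1 else 0)) % 2
        = pvBI (if ch = '1' then !q else q) := by
      by_cases hc : ch = '1' <;> cases q <;>
        simp only [hc, if_true, if_false, Bool.not_true, Bool.not_false,
          pvBI_true, pvBI_false] at h ⊢ <;> omega
    have h2' : PySem.Int.mod (c + (if ch = '1' then 1 else 0)) 2
        = pvBI (if ch = '1' then !q else q) := by rw [hmod]; exact h2
    have : pvAstep (c, a) ch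
        = (c + (if ch = '1' then 1 else 0), a + pvBI (if ch = '1' then !q else q)) := by
      simp [pvAstep, h2]
    rw [this, ih _ _ _ h2']
    by_cases hc : ch = '1' <;> simp [pvOD, pvBI, hc] <;> ring

-- Σ_{i < n} (#odd-prefix count of drop i) = E * O
lemma pvMain : ∀ xs : List Char,
    ((List.range xs.length).map (fun k => pvOD false (xs.drop k))).sum
      = (pvEO xs).1 * (pvEO xs).2 := by
  intro xs
  induction xs with
  | nil => simp [pvEO]
  | cons c xs ih =>
    rw [List.length_cons, List.range_succ_eq_map, List.map_cons, List.map_map, List.sum_cons]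
    have hdrop : ((List.range xs.length).map ((fun k => pvOD false ((c :: xs).drop k)) ∘ Nat.succ)).sum
        = ((List.range xs.length).map (fun k => pvOD false (xs.drop k))).sum := by
      congr 1
    rw [hdrop, ih, List.drop_zero]
    rw [(pvRel (c :: xs)).2.2.1]
    by_cases hc : c = '1' <;> simp [pvEO, hc] <;> ring

-- the ports, rephrased with the let-free step functions (definitional)
lemma pvA_eq (s : String) :
    count_odd_slow s
      = (PySem.List.pyRange 0 ((s.toList.length : Int)) 1).foldl
          (fun ans i =>
            ((PySem.List.pyRange i ((s.toList.length : Int)) 1).foldl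
              (fun acc j => pvAstep acc (PySem.List.pyGetD s.toList j ' '))
              ((0 : Int), ans)).2)
          0 := by
  simp only [count_odd_slow, PySem.Str.len_eq]
  rfl

lemma pvB_eq (s : String) :
    count_odd_slow_alt s
      = (s.toList.foldl pvBstep ((0 : Int), (1 : Int))).2
          * ((s.toList.length : Int) + 1 - (s.toList.foldl pvBstep ((0 : Int), (1 : Int))).2) := by
  simp only [count_odd_slow_alt, PySem.Str.len_eq]
  rfl

-- ===== VERDICT (by name: the statement is the Claim_ definition above) =====
theorem count_odd_slow_spec : Claim_equal_count_odd_slow := by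
  intro s _
  unfold Spec_count_odd_slow
  rw [pvA_eq, pvB_eq]
  set l := s.toList with hl
  -- B side
  have hB : (l.foldl pvBstep ((0 : Int), (1 : Int))).2 = (pvEO l).1 := by
    have := pvB_fold l false 1
    simp only [pvBI, if_false, Bool.false_eq_true] at this
    rw [this, (pvRel l).1]
    ring
  rw [hB]
  have hsum : (l.length : Int) + 1 - (pvEO l).1 = (pvEO l).2 := by
    have := pvEO_sum l
    omega
  rw [hsum]
  -- A side
  rw [PySem.List.foldl_congr_mem' _ _
        (fun ans i => ans + pvOD false (l.drop i.toNat)) 0 ?_]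
  · rw [PySem.List.foldl_add]
    rw [zero_add, PySem.List.pyRange_zero_natCast, List.map_map]
    have : ((List.range l.length).map ((fun i => pvOD false (l.drop i.toNat)) ∘ (fun k : Nat => (k : Int))))
        = (List.range l.length).map (fun k => pvOD false (l.drop k)) := by
      apply List.map_congr_left
      intro k _
      simp
    rw [this, pvMain]
  · intro i hi ans
    have h0 : 0 ≤ i := (PySem.List.mem_pyRange_one.mp hi).1
    rw [PySem.List.foldl_pyRange_pyGetD' l ' ' pvAstep ((0 : Int), ans) h0]
    exact pvA_inner _ false 0 ans (by decide)
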